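-- pv_equiv track=rewrite | github.com/shivbhatia10/advent_of_code_2024 | day9/day9.py | compactify
-- ===== SOURCE A (Python) =====
-- def compactify(source_file: list[int | None]) -> list[int | None]:
--     """
--     Returns the compactified file
--     """
--     file = source_file[:]
--     l, r = 0, len(file) - 1
--     while l < r:
--         while file[l] is not None:
--             l += 1
--         while file[r] is None:
--             r -= 1
--         if l < r:
--             file[l], file[r] = file[r], file[l]
--     return file
-- ===== SOURCE B (Python) =====
-- def compactify(source_file: list[int | None]) -> list[int | None]:
--     """
--     Returns the compactified file
--     """
--     n = len(source_file)
--     k = sum(1 for v in source_file if v is not None)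
--     it = iter([v for v in reversed(source_file[k:]) if v is not None])
--     out = [v if v is not None else next(it) for v in source_file[:k]]
--     out.extend([None] * (n - k))
--     return out
-- ===== Notes on version B (the rewrite author's own statement) =====
-- stated objective: alternative
-- what changed: A's converging two-pointer in-place swap loop is replaced by a count pass (k = number of non-None entries) plus a single fill pass that keeps non-None prefix values and pops gap-fillers from the reversed list of non-None values found at indices >= k.
import Mathlib
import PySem

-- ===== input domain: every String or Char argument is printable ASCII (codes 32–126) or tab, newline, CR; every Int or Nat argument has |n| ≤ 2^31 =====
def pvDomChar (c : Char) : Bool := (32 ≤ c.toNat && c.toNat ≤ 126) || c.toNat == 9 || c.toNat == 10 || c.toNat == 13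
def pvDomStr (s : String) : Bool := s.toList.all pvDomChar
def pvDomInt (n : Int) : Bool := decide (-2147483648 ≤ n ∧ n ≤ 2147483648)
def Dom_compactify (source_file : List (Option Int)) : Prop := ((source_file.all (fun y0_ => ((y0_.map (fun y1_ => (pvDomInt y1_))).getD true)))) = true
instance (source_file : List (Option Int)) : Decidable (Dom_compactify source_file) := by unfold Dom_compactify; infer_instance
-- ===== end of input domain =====

-- B replaces A's converging two-pointer swap loop by a count pass plus a single fill pass
-- (keep non-None prefix entries, fill gaps from the reversed non-None tail); A copies its
-- argument first, so neither version mutates the caller's list.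

-- ===== PORT A =====
-- inner loop `while file[l] is not None: l += 1` (fuel-bounded; a `none` from pyGet? is
-- Python's IndexError — unreachable on inputs satisfying Pre_ — where we stop)
def advL (file : List (Option Int)) (l : Int) : Nat → Int
  | 0 => l
  | fuel+1 =>
    match PySem.List.pyGet? file l with
    | some (some _) => advL file (l+1) fuel
    | _ => l

-- inner loop `while file[r] is None: r -= 1` (same conventions)
def advR (file : List (Option Int)) (r : Int) : Nat → Int
  | 0 => r
  | fuel+1 =>
    match PySem.List.pyGet? file r with
    | some none => advR file (r-1) fuel
    | _ => r

-- `file[i] = v` with Python index semantics (negative = from the end; an out-of-range index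
-- is Python's IndexError — unreachable under Pre_ — where we leave the list unchanged)
def pySet (xs : List (Option Int)) (i : Int) (v : Option Int) : List (Option Int) :=
  let j := if i < 0 then i + xs.length else i
  if 0 ≤ j ∧ j < xs.length then xs.set j.toNat v else xs

-- `file[l], file[r] = file[r], file[l]`
def swapLR (file : List (Option Int)) (l r : Int) : List (Option Int) :=
  match PySem.List.pyGet? file l, PySem.List.pyGet? file r with
  | some a, some b => pySet (pySet file l b) r a
  | _, _ => file

-- outer `while l < r:` loop (fuel-bounded; iterations ≤ number of swaps + 1 ≤ length + 1)
def loopA (file : List (Option Int)) (l r : Int) : Nat → List (Option Int)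
  | 0 => file
  | fuel+1 =>
    if l < r then
      let l' := advL file l (file.length + 1)
      let r' := advR file r (2 * file.length + 2)
      if l' < r' then loopA (swapLR file l' r') l' r' fuel
      else file
    else file

def compactify (source_file : List (Option Int)) : List (Option Int) :=
  loopA source_file 0 ((source_file.length : Int) - 1) (source_file.length + 1)

-- ===== PORT B =====
-- the list comprehension `[v if v is not None else next(it) for v in source_file[:k]]`:
-- copy non-None entries, pop the next gap-filler otherwise (an exhausted iterator would be
-- Python's StopIteration; unreachable, since the prefix has exactly as many gaps as fillers)
def fillGaps : List (Option Int) → List Int → List (Option Int)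
  | [], _ => []
  | some v :: xs, rem => some v :: fillGaps xs rem
  | none :: xs, t :: ts => some t :: fillGaps xs ts
  | none :: xs, [] => none :: fillGaps xs []

def compactify_alt (source_file : List (Option Int)) : List (Option Int) :=
  let n := source_file.length
  let k := source_file.countP (fun v => v.isSome)
  let tail := ((source_file.drop k).reverse).filterMap id
  fillGaps (source_file.take k) tail ++ List.replicate (n - k) none

-- ===== PRECONDITION & SPEC =====
-- Pre_ excludes exactly the inputs where A raises IndexError: lists of length ≥ 2 that are
-- all-None (r runs off the left end) or all-non-None (l runs off the right end).
def Pre_compactify (source_file : List (Option Int)) : Prop :=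
  source_file.length ≤ 1 ∨ (none ∈ source_file ∧ ∃ x ∈ source_file, x.isSome)
instance (source_file : List (Option Int)) : Decidable (Pre_compactify source_file) := by
  unfold Pre_compactify; infer_instance

def pvWitness_compactify : List (Option Int) := [some 1, none, some 2]

def Spec_compactify (source_file : List (Option Int)) (out : List (Option Int)) : Prop := out = compactify_alt source_file
instance (source_file : List (Option Int)) (out : List (Option Int)) : Decidable (Spec_compactify source_file out) := by unfold Spec_compactify; infer_instance

-- ===== CLAIM (what is proved, stated in full; the proofs are below) =====
def Claim_equal_compactify : Prop := ∀ (source_file : List (Option Int)), Dom_compactify source_file → Pre_compactify source_file → Spec_compactify source_file (compactify source_file)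

-- ===== LEMMAS AND PROOFS =====

-- number of gaps (None entries) in the prefix of length k = countP isSome: A's loop measure
def gapsN (file : List (Option Int)) : Nat :=
  (file.take (file.countP (fun v => v.isSome))).countP (fun v => v.isNone)

-- all-some prefixes pass through fillGaps unchanged
lemma fillGaps_allSome (a : List (Option Int)) (xs : List (Option Int)) (rem : List Int)
    (ha : ∀ x ∈ a, x.isSome) :
    fillGaps (a ++ xs) rem = a ++ fillGaps xs rem := by
  induction a with
  | nil => simp
  | cons y a ih =>
    have hy : y.isSome := ha y (by simp)
    obtain ⟨v, rfl⟩ := Option.isSome_iff_exists.mp hy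
    simp only [List.cons_append, fillGaps]
    rw [ih (fun x hx => ha x (by simp [hx]))]

lemma fillGaps_nil_rem (a : List (Option Int)) (rem : List Int)
    (ha : ∀ x ∈ a, x.isSome) : fillGaps a rem = a := by
  have := fillGaps_allSome a [] rem ha
  simpa [fillGaps] using this

lemma countP_allSome (a : List (Option Int)) (ha : ∀ x ∈ a, x.isSome) :
    a.countP (fun v => v.isSome) = a.length := by
  rw [List.countP_eq_length]
  intro x hx; simpa using ha x hx

lemma countP_allNone (g : List (Option Int)) (hg : ∀ x ∈ g, x = none) :
    g.countP (fun v => v.isSome) = 0 := by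
  rw [List.countP_eq_zero]
  intro x hx; simp [hg x hx]

lemma filterMap_allNone (g : List (Option Int)) (hg : ∀ x ∈ g, x = none) :
    g.filterMap id = [] := by
  rw [List.filterMap_eq_nil_iff]
  intro x hx; simp [hg x hx]

-- compactify_alt is the identity on already-compact lists
lemma alt_sorted (a g : List (Option Int))
    (ha : ∀ x ∈ a, x.isSome) (hg : ∀ x ∈ g, x = none) :
    compactify_alt (a ++ g) = a ++ g := by
  simp only [compactify_alt]
  have hk : (a ++ g).countP (fun v => v.isSome) = a.length := by
    rw [List.countP_append, countP_allSome a ha, countP_allNone g hg]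
    omega
  have ht : (a ++ g).take a.length = a := by
    simp
  have hd : (a ++ g).drop a.length = g := by
    simp
  rw [hk, ht, hd, filterMap_allNone g.reverse (fun x hx => hg x (List.mem_reverse.mp hx)),
    fillGaps_nil_rem a _ ha]
  have hrep : List.replicate ((a ++ g).length - a.length) (none : Option Int) = g := by
    simp only [List.length_append, Nat.add_sub_cancel_left]
    exact (List.eq_replicate_of_mem (fun x hx => hg x hx)).symm
  rw [hrep]

lemma count_swap1 (a b g : List (Option Int)) (v : Int)
    (ha : ∀ x ∈ a, x.isSome) (hg : ∀ x ∈ g, x = none) :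
    (a ++ some v :: b ++ none :: g).countP (fun v => v.isSome)
      = a.length + 1 + b.countP (fun v => v.isSome) := by
  simp [List.countP_append, countP_allSome a ha, countP_allNone g hg]
  omega

lemma count_swap2 (a b g : List (Option Int)) (v : Int)
    (ha : ∀ x ∈ a, x.isSome) (hg : ∀ x ∈ g, x = none) :
    (a ++ none :: b ++ some v :: g).countP (fun v => v.isSome)
      = a.length + 1 + b.countP (fun v => v.isSome) := by
  simp [List.countP_append, countP_allSome a ha, countP_allNone g hg]
  omega

lemma take_mid (a b rest : List (Option Int)) (x : Option Int) (c : Nat) (hcb : c ≤ b.length) :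
    (a ++ x :: b ++ rest).take (a.length + 1 + c) = a ++ x :: b.take c := by
  have hre : a ++ x :: b ++ rest = a ++ x :: (b ++ rest) := by simp
  have h1 : a.length + 1 + c - a.length = c + 1 := by omega
  rw [hre, List.take_append, List.take_of_length_le (by omega : a.length ≤ a.length + 1 + c),
    h1, List.take_succ_cons, List.take_append, Nat.sub_eq_zero_of_le hcb]
  simp

lemma drop_mid (a b rest : List (Option Int)) (x : Option Int) (c : Nat) (hcb : c ≤ b.length) :
    (a ++ x :: b ++ rest).drop (a.length + 1 + c) = b.drop c ++ rest := by
  have hre : a ++ x :: b ++ rest = a ++ x :: (b ++ rest) := by simp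
  have h1 : a.length + 1 + c - a.length = c + 1 := by omega
  rw [hre, List.drop_append, List.drop_eq_nil_of_le (by omega : a.length ≤ a.length + 1 + c),
    h1, List.drop_succ_cons, List.drop_append, Nat.sub_eq_zero_of_le hcb]
  simp

-- the key invariant: compactify_alt is unchanged by one of A's swaps (first gap ↔ last value)
lemma alt_swap (a b g : List (Option Int)) (v : Int)
    (ha : ∀ x ∈ a, x.isSome) (hg : ∀ x ∈ g, x = none) :
    compactify_alt (a ++ some v :: b ++ none :: g)
      = compactify_alt (a ++ none :: b ++ some v :: g) := by
  simp only [compactify_alt]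
  set c := b.countP (fun v => v.isSome) with hc
  have hcb : c ≤ b.length := List.countP_le_length
  rw [count_swap1 a b g v ha hg, count_swap2 a b g v ha hg, ← hc,
    take_mid a b _ _ c hcb, take_mid a b _ _ c hcb,
    drop_mid a b _ _ c hcb, drop_mid a b _ _ c hcb]
  have hgrev : g.reverse.filterMap id = [] :=
    filterMap_allNone g.reverse (fun x hx => hg x (List.mem_reverse.mp hx))
  have htail1 : ((b.drop c ++ none :: g).reverse).filterMap id
      = (b.drop c).reverse.filterMap id := by
    simp [List.reverse_append, List.filterMap_append]
    exact hg
  have htail2 : ((b.drop c ++ some v :: g).reverse).filterMap id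
      = v :: (b.drop c).reverse.filterMap id := by
    simp [List.reverse_append, List.filterMap_append]
    exact hg
  rw [htail1, htail2]
  have h1 : fillGaps (a ++ some v :: b.take c) ((b.drop c).reverse.filterMap id)
      = a ++ some v :: fillGaps (b.take c) ((b.drop c).reverse.filterMap id) := by
    rw [fillGaps_allSome a _ _ ha]; rfl
  have h2 : fillGaps (a ++ none :: b.take c) (v :: (b.drop c).reverse.filterMap id)
      = a ++ some v :: fillGaps (b.take c) ((b.drop c).reverse.filterMap id) := by
    rw [fillGaps_allSome a _ _ ha]; rfl
  rw [h1, h2]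
  have hlen : (a ++ some v :: b ++ none :: g).length = (a ++ none :: b ++ some v :: g).length := by
    simp
  rw [hlen]

-- one swap strictly decreases the gap measure
lemma gaps_swap (a b g : List (Option Int)) (v : Int)
    (ha : ∀ x ∈ a, x.isSome) (hg : ∀ x ∈ g, x = none) :
    gapsN (a ++ some v :: b ++ none :: g) < gapsN (a ++ none :: b ++ some v :: g) := by
  simp only [gapsN]
  set c := b.countP (fun v => v.isSome) with hc
  have hcb : c ≤ b.length := List.countP_le_length
  rw [count_swap1 a b g v ha hg, count_swap2 a b g v ha hg, ← hc,
    take_mid a b _ _ c hcb, take_mid a b _ _ c hcb]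
  simp [List.countP_append]

lemma gapsN_le_length (file : List (Option Int)) : gapsN file ≤ file.length := by
  refine le_trans List.countP_le_length ?_
  rw [List.length_take]
  omega

lemma getElem_mem_take (file : List (Option Int)) (m i : Nat) (h1 : i < m)
    (h2 : i < file.length) : file[i] ∈ file.take m := by
  have hlt : i < (file.take m).length := by rw [List.length_take]; omega
  have he : (file.take m)[i]'hlt = file[i] := List.getElem_take
  exact he ▸ List.getElem_mem hlt

lemma getElem_mem_drop (file : List (Option Int)) (m i : Nat) (h : m + i < file.length) :
    file[m + i] ∈ file.drop m := by
  have hlt : i < (file.drop m).length := by rw [List.length_drop]; omega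
  have he : (file.drop m)[i]'hlt = file[m + i] := List.getElem_drop
  exact he ▸ List.getElem_mem hlt

lemma take_all_isSome (file : List (Option Int)) (m : Nat)
    (h : ∀ i : Nat, i < m → ∀ hi : i < file.length, (file[i]).isSome) :
    ∀ x ∈ file.take m, x.isSome := by
  intro x hx
  obtain ⟨i, hi, rfl⟩ := List.mem_iff_getElem.mp hx
  rw [List.getElem_take]
  exact h i (by rw [List.length_take] at hi; omega) _

lemma drop_all_none (file : List (Option Int)) (m : Nat)
    (h : ∀ i : Nat, m ≤ i → ∀ hi : i < file.length, file[i] = none) :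
    ∀ x ∈ file.drop m, x = none := by
  intro x hx
  obtain ⟨i, hi, rfl⟩ := List.mem_iff_getElem.mp hx
  rw [List.getElem_drop]
  exact h (m + i) (by omega) _

-- A's first inner loop finds the first None index
lemma advL_eq (file : List (Option Int)) (p : Nat) (hp : p < file.length)
    (hpn : file[p] = none)
    (hall : ∀ i : Nat, i < p → ∀ h : i < file.length, (file[i]).isSome) :
    ∀ (fuel : Nat) (l : Int), 0 ≤ l → l ≤ (p : Int) → p - l.toNat < fuel →
    advL file l fuel = p := by
  intro fuel
  induction fuel with
  | zero => intro l _ _ hf; omega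
  | succ fuel ih =>
    intro l hl0 hlp hf
    have hlt : l.toNat ≤ p := by omega
    have hln : l.toNat < file.length := by omega
    have hget : PySem.List.pyGet? file l = some file[l.toNat] := by
      rw [PySem.List.pyGet?_of_nonneg _ hl0]
      exact List.getElem?_eq_getElem hln
    by_cases hcase : l.toNat = p
    · have : file[l.toNat] = none := by simp [hcase, hpn]
      rw [this] at hget
      simp only [advL, hget]
      omega
    · have hlp' : l.toNat < p := by omega
      have hs : (file[l.toNat]).isSome := hall l.toNat hlp' hln
      obtain ⟨w, hw⟩ := Option.isSome_iff_exists.mp hs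
      rw [hw] at hget
      simp only [advL, hget]
      exact ih (l + 1) (by omega) (by omega) (by omega)

-- A's second inner loop finds the last non-None index
lemma advR_eq (file : List (Option Int)) (q : Nat) (hq : q < file.length)
    (hqs : (file[q]).isSome)
    (hall : ∀ i : Nat, q < i → ∀ h : i < file.length, file[i] = none) :
    ∀ (fuel : Nat) (r : Int), (q : Int) ≤ r → r < (file.length : Int) →
    r.toNat - q < fuel → advR file r fuel = q := by
  intro fuel
  induction fuel with
  | zero => intro r hqr hr hf; omega
  | succ fuel ih =>
    intro r hqr hr hf
    have hr0 : 0 ≤ r := by omega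
    have hrn : r.toNat < file.length := by omega
    have hget : PySem.List.pyGet? file r = some file[r.toNat] := by
      rw [PySem.List.pyGet?_of_nonneg _ hr0]
      exact List.getElem?_eq_getElem hrn
    by_cases hcase : r.toNat = q
    · have : file[r.toNat] = file[q] := by simp [hcase]
      obtain ⟨w, hw⟩ := Option.isSome_iff_exists.mp (this ▸ hqs)
      rw [hw] at hget
      simp only [advR, hget]
      omega
    · have hqr' : q < r.toNat := by omega
      have hn : file[r.toNat] = none := hall r.toNat hqr' hrn
      rw [hn] at hget
      simp only [advR, hget]
      exact ih (r - 1) (by omega) (by omega) (by omega)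

-- the swap statement on the decomposed list
lemma swapLR_decomp (a b g : List (Option Int)) (v : Int) (p q : Nat)
    (hp : p = a.length) (hq : q = a.length + 1 + b.length) :
    swapLR (a ++ none :: b ++ some v :: g) (p : Int) (q : Int)
      = a ++ some v :: b ++ none :: g := by
  subst hp hq
  set file := a ++ none :: b ++ some v :: g with hfile
  have hlen : file.length = a.length + b.length + g.length + 2 := by simp [hfile]; omega
  have hget1 : PySem.List.pyGet? file (a.length : Int) = some none := by
    have hre : file = a ++ none :: (b ++ some v :: g) := by simp [hfile]
    rw [hre]
    exact PySem.List.pyGet?_append_length a _ none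
  have hget2 : PySem.List.pyGet? file ((a.length + 1 + b.length : Nat) : Int) = some (some v) := by
    have hre : file = (a ++ none :: b) ++ some v :: g := by simp [hfile]
    have hl2 : (a ++ none :: b).length = a.length + 1 + b.length := by simp; omega
    rw [hre, ← hl2]
    exact PySem.List.pyGet?_append_length _ g (some v)
  simp only [swapLR, hget1, hget2]
  have hset1 : pySet file (a.length : Int) (some v) = a ++ some v :: b ++ some v :: g := by
    simp only [pySet]
    rw [if_neg (by omega : ¬ ((a.length : Int) < 0))]
    rw [if_pos (by
      refine ⟨by omega, ?_⟩
      exact_mod_cast (by omega : a.length < file.length))]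
    simp [hfile]
  rw [hset1]
  have hlen2 : (a ++ some v :: b ++ some v :: g).length = file.length := by simp [hfile]
  have hre2 : a ++ some v :: b ++ some v :: g = (a ++ some v :: b) ++ some v :: g := by simp
  simp only [pySet]
  rw [if_neg (by omega : ¬ (((a.length + 1 + b.length : Nat) : Int) < 0))]
  rw [if_pos (by
    refine ⟨by omega, ?_⟩
    rw [hlen2]
    exact_mod_cast (by omega : a.length + 1 + b.length < file.length))]
  rw [hre2]
  have hl2 : (a ++ some v :: b).length = a.length + 1 + b.length := by simp; omega
  have htn : ((a.length + 1 + b.length : Nat) : Int).toNat = (a ++ some v :: b).length := by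
    simp [hl2]
    omega
  rw [htn]
  simp

-- the main loop invariant: with an all-Some prefix before l, an all-None suffix after r,
-- and a mixed list, A's outer loop computes compactify_alt
lemma loopA_eq : ∀ (fuel : Nat) (file : List (Option Int)) (l r : Int),
    0 ≤ l → l < r → r < (file.length : Int) →
    (∀ x ∈ file.take l.toNat, x.isSome) →
    (∀ x ∈ file.drop (r.toNat + 1), x = none) →
    none ∈ file → (∃ x ∈ file, x.isSome) →
    gapsN file < fuel →
    loopA file l r fuel = compactify_alt file := by
  intro fuel
  induction fuel with
  | zero => intro file l r _ _ _ _ _ _ _ hf; omega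
  | succ fuel ih =>
    intro file l r hl0 hlr hr hpre hsuf hnone hsome hfuel
    -- the first None index p
    have hexp : ∃ i : Nat, file[i]? = some none := by
      obtain ⟨i, hi, hv⟩ := List.mem_iff_getElem.mp hnone
      exact ⟨i, by rw [List.getElem?_eq_getElem hi, hv]⟩
    let p := Nat.find hexp
    have hp? : file[p]? = some none := Nat.find_spec hexp
    obtain ⟨hplen, hpn⟩ := List.getElem?_eq_some_iff.mp hp?
    have hpmin : ∀ i : Nat, i < p → ∀ h : i < file.length, (file[i]).isSome := by
      intro i hip h
      have := Nat.find_min hexp hip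
      rw [List.getElem?_eq_getElem h] at this
      rcases hx : file[i] with _ | w
      · exact absurd (by rw [hx]) this
      · simp
    -- the last non-None index q
    obtain ⟨x, hxmem, hxs⟩ := hsome
    obtain ⟨j, hj, hjv⟩ := List.mem_iff_getElem.mp hxmem
    let Q : Nat → Prop := fun i => ((file[i]?).getD none).isSome = true
    have hQj : Q j := by
      show ((file[j]?).getD none).isSome = true
      rw [List.getElem?_eq_getElem hj, hjv]; simpa
    let q := Nat.findGreatest Q (file.length - 1)
    have hjb : j ≤ file.length - 1 := by omega
    have hQq : ((file[q]?).getD none).isSome :=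
      Nat.findGreatest_spec (P := Q) hjb hQj
    have hqlen : q < file.length := by
      by_contra hc
      rw [List.getElem?_eq_none (by omega)] at hQq
      simp at hQq
    have hqs : (file[q]).isSome := by
      rw [List.getElem?_eq_getElem hqlen] at hQq; simpa using hQq
    have hqmax : ∀ i : Nat, q < i → ∀ h : i < file.length, file[i] = none := by
      intro i hqi h
      have hni : ¬ Q i :=
        Nat.findGreatest_is_greatest (P := Q) hqi (by omega)
      have hni' : ¬ ((file[i]?).getD none).isSome = true := hni
      rw [List.getElem?_eq_getElem h] at hni'
      simpa using Option.not_isSome_iff_eq_none.mp (by simpa using hni')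
    -- pointer bounds
    have hlp : l ≤ (p : Int) := by
      by_contra hc
      have hplt : p < l.toNat := by omega
      have hmem : file[p] ∈ file.take l.toNat := getElem_mem_take file l.toNat p hplt hplen
      have := hpre _ hmem
      rw [hpn] at this
      simp at this
    have hqr : (q : Int) ≤ r := by
      by_contra hc
      have hrq : r.toNat + 1 + (q - (r.toNat + 1)) = q := by omega
      have hmem := getElem_mem_drop file (r.toNat + 1) (q - (r.toNat + 1)) (by omega)
      have hval := hsuf _ hmem
      have h1 : file[r.toNat + 1 + (q - (r.toNat + 1))]? = some none := by
        rw [List.getElem?_eq_getElem (by omega), hval]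
      rw [hrq, List.getElem?_eq_getElem hqlen] at h1
      rw [Option.some_inj.mp h1] at hqs
      simp at hqs
    -- evaluate the inner loops
    have hL : advL file l (file.length + 1) = p :=
      advL_eq file p hplen hpn hpmin (file.length + 1) l hl0 hlp (by omega)
    have hR : advR file r (2 * file.length + 2) = q :=
      advR_eq file q hqlen hqs hqmax (2 * file.length + 2) r hqr hr (by omega)
    simp only [loopA, if_pos hlr, hL, hR]
    by_cases hpq : (p : Int) < (q : Int)
    · -- swap case: decompose file = a ++ none :: b ++ some v :: g and recurse
      rw [if_pos hpq]
      have hpq' : p < q := by exact_mod_cast hpq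
      obtain ⟨v, hv⟩ := Option.isSome_iff_exists.mp hqs
      set a := file.take p with hadef
      set b := (file.drop (p+1)).take (q - (p+1)) with hbdef
      set g := file.drop (q+1) with hgdef
      have hba : a.length = p := by rw [hadef, List.length_take]; omega
      have hbb : b.length = q - (p+1) := by
        rw [hbdef, List.length_take, List.length_drop]; omega
      have hd0 : file = a ++ (none :: (b ++ (some v :: g))) := by
        conv_lhs => rw [← List.take_append_drop p file]
        congr 1
        rw [List.drop_eq_getElem_cons hplen, hpn]
        congr 1
        conv_lhs => rw [← List.take_append_drop (q - (p+1)) (file.drop (p+1))]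
        congr 1
        rw [List.drop_drop, (by omega : p + 1 + (q - (p + 1)) = q),
          List.drop_eq_getElem_cons hqlen, hv]
      have hdecomp : file = a ++ none :: b ++ some v :: g := by
        rw [hd0]
        simp
      have hasome : ∀ x ∈ a, x.isSome := by
        rw [hadef]
        exact take_all_isSome file p (fun i hip hi => hpmin i hip hi)
      have hgnone : ∀ x ∈ g, x = none := by
        rw [hgdef]
        exact drop_all_none file (q+1) (fun i hqi hi => hqmax i (by omega) hi)
      have hswap : swapLR file (p : Int) (q : Int) = a ++ some v :: b ++ none :: g := by
        conv_lhs => rw [hdecomp]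
        exact swapLR_decomp a b g v p q hba.symm (by omega)
      rw [hswap]
      set file' := a ++ some v :: b ++ none :: g with hfdef
      have hlen' : file'.length = file.length := by
        conv_rhs => rw [hdecomp]
        simp [hfdef]
      have hih := ih file' (p : Int) (q : Int) (by omega) hpq
        (by rw [hlen']; omega)
        (by
          intro x hx
          have htk : file'.take ((p : Int)).toNat = a := by
            have hre : file' = a ++ (some v :: (b ++ (none :: g))) := by simp [hfdef]
            rw [Int.toNat_natCast, hre, ← hba, List.take_left]
          rw [htk] at hx
          exact hasome x hx)
        (by
          intro x hx
          have hdr : file'.drop (((q : Int)).toNat + 1) = g := by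
            have hre : file' = (a ++ some v :: b) ++ none :: g := by simp [hfdef]
            have hl2 : (a ++ some v :: b).length = q := by simp [hba, hbb]; omega
            rw [Int.toNat_natCast, hre, List.drop_append]
            rw [List.drop_eq_nil_of_le (by omega : (a ++ some v :: b).length ≤ q + 1), hl2]
            simp
          rw [hdr] at hx
          exact hgnone x hx)
        (by simp [hfdef])
        (⟨some v, by simp [hfdef], rfl⟩)
        (by
          have hlt := gaps_swap a b g v hasome hgnone
          rw [hdecomp] at hfuel
          rw [hfdef]
          omega)
      rw [hih, hfdef, alt_swap a b g v hasome hgnone, ← hdecomp]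
    · -- no swap: the list is already compact, return it
      rw [if_neg hpq]
      have hne : p ≠ q := by
        intro h
        have h1 : file[p]? = file[q]? := by rw [h]
        rw [List.getElem?_eq_getElem hplen, List.getElem?_eq_getElem hqlen, hpn] at h1
        rw [← Option.some_inj.mp h1] at hqs
        simp at hqs
      have h1 : ∀ x ∈ file.take p, x.isSome := take_all_isSome file p hpmin
      have h2 : ∀ x ∈ file.drop p, x = none :=
        drop_all_none file p (fun i hpi hi => hqmax i (by
          have : ¬ (p < q) := by exact_mod_cast hpq
          omega) hi)
      have hs := alt_sorted (file.take p) (file.drop p) h1 h2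
      rw [List.take_append_drop] at hs
      exact hs.symm

-- ===== VERDICT (by name: the statements are the Claim_ definitions above) =====
theorem compactify_spec : Claim_equal_compactify := by
  intro sf _ hpre
  unfold Spec_compactify compactify
  rcases hpre with hlen | ⟨hnone, hsome⟩
  · rcases sf with _ | ⟨x, _ | ⟨y, t⟩⟩
    · decide
    · rcases x with _ | v
      · decide
      · simp [loopA, compactify_alt, fillGaps]
    · simp at hlen
  · have hlen2 : 2 ≤ sf.length := by
      rcases sf with _ | ⟨x, _ | ⟨y, t⟩⟩
      · simp at hnone
      · obtain ⟨z, hz, hzs⟩ := hsome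
        simp at hnone hz
        rw [hz, ← hnone] at hzs
        simp at hzs
      · simp
    refine loopA_eq (sf.length + 1) sf 0 ((sf.length : Int) - 1) le_rfl
      (by omega) (by omega) ?_ ?_ hnone hsome
      (by have := gapsN_le_length sf; omega)
    · simp
    · intro x hx
      have : ((sf.length : Int) - 1).toNat + 1 = sf.length := by omega
      rw [this, List.drop_length] at hx
      simp at hx
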